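-- pv_equiv track=rewrite | github.com/NasoohOlabi/Stegasus | Typo.py | find_ambiguous_or_invalid_matches
-- ===== SOURCE A (Python) =====
-- from typing import Callable, Generator, List, Optional, Tuple
--
-- def find_ambiguous_or_invalid_matches(mutations: List[str]) -> List[int]:
--    ambiguous_invalid_matches = []
--    for i, new_string in enumerate(mutations):
--       if len(new_string) == 0:
--             # If the mutation is an empty string, it is ambiguous or invalid
--             ambiguous_invalid_matches.append(i)
--       else:
--             for j in range(i):
--                if mutations[j] == mutations[i]:
--                   # If the mutation is the same as a previous one, it is ambiguous
--                   ambiguous_invalid_matches.append(i)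
--                   break
--
--    return ambiguous_invalid_matches
-- ===== SOURCE B (Python) =====
-- from typing import List
--
-- def find_ambiguous_or_invalid_matches(mutations: List[str]) -> List[int]:
--     # Sort (value, index) pairs; equal values then sit adjacent with ascending
--     # indices, so a pair is ambiguous/invalid exactly when its value is empty
--     # or equals the previous pair's value. Re-sort emitted indices ascending.
--     pairs = sorted((s, i) for i, s in enumerate(mutations))
--     out = [i for k, (s, i) in enumerate(pairs)
--            if s == "" or (k > 0 and pairs[k - 1][0] == s)]
--     return sorted(out)
-- ===== Notes on version B (the rewrite author's own statement) =====
-- stated objective: faster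
-- what changed: Replaces A's per-element backward scan over all earlier elements by sorting the (value, index) pairs, marking each pair whose value is empty or equal to its predecessor's value in the sorted order, and re-sorting the marked indices ascending.
import Mathlib
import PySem

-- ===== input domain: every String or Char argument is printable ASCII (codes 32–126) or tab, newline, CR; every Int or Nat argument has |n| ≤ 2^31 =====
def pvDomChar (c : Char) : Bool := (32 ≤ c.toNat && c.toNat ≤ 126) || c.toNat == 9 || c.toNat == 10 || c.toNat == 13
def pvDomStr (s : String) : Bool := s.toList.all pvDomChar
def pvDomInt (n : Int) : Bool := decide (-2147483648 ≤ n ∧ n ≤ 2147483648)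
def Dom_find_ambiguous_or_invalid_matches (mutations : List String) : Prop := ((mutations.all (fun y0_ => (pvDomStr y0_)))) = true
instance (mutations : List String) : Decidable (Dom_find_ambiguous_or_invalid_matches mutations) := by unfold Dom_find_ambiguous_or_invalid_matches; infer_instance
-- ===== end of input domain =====

-- B replaces A's quadratic backward scan by sort-the-(value,index)-pairs, mark each pair whose
-- value is empty or equal to its predecessor's value, and re-sort the marked indices (objective: faster).

-- ===== PORT A =====
-- literal transliteration of A: for each (i, new_string), append i if the string is empty,
-- else scan j in range(i) for an earlier equal element (the `break` makes the inner loop `any`)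
def find_ambiguous_or_invalid_matches (mutations : List String) : List Int :=
  (PySem.List.enumerate mutations).foldl
    (fun acc p =>
      if PySem.Str.len p.2 == 0 then acc ++ [p.1]
      else if (PySem.List.pyRange 0 p.1 1).any
              (fun j => PySem.List.pyGetD mutations j "" == PySem.List.pyGetD mutations p.1 "")
           then acc ++ [p.1] else acc)
    []

-- ===== PORT B =====
-- literal transliteration of Source B: sort the (value, index) pairs, keep the index of each pair
-- whose value is empty or equal to the previous pair's value, sort the kept indices.
-- `pairs[k-1]` is only read under `k > 0`, where it is in range; pyGetD supplies the unused default.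
def find_ambiguous_or_invalid_matches_alt (mutations : List String) : List Int :=
  let pairs := PySem.List.sorted2 ((PySem.List.enumerate mutations).map (fun p => (p.2, p.1)))
        Prod.fst Prod.snd
  let out := ((PySem.List.enumerate pairs).filter
      (fun q => q.2.1 == "" ||
        (decide (0 < q.1) && (PySem.List.pyGetD pairs (q.1 - 1) ("", 0)).1 == q.2.1))).map
    (fun q => q.2.2)
  PySem.List.sorted out (fun x => x)

-- ===== PRECONDITION & SPEC =====
def Spec_find_ambiguous_or_invalid_matches (mutations : List String) (out : List Int) : Prop := out = find_ambiguous_or_invalid_matches_alt mutations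
instance (mutations : List String) (out : List Int) : Decidable (Spec_find_ambiguous_or_invalid_matches mutations out) := by unfold Spec_find_ambiguous_or_invalid_matches; infer_instance

-- ===== CLAIM (what is proved, stated in full; the proofs are below) =====
def Claim_equal_find_ambiguous_or_invalid_matches : Prop := ∀ (mutations : List String), Dom_find_ambiguous_or_invalid_matches mutations → Spec_find_ambiguous_or_invalid_matches mutations (find_ambiguous_or_invalid_matches mutations)

-- ===== LEMMAS AND PROOFS =====
def pvLt (a b : String × Int) : Bool :=
  decide (a.1 < b.1) || (!decide (b.1 < a.1) && decide (a.2 < b.2))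

lemma pvLt_false_iff (a b : String × Int) :
    pvLt b a = false ↔ a.1 ≤ b.1 ∧ (a.1 < b.1 ∨ a.2 ≤ b.2) := by
  simp only [pvLt, Bool.or_eq_false_iff, Bool.and_eq_false_iff, Bool.not_eq_eq_eq_not,
    Bool.not_false, decide_eq_false_iff_not, decide_eq_true_eq, not_lt]

lemma pvLt_asymm (a b : String × Int) (h : pvLt a b = true) : pvLt b a = false := by
  rw [pvLt_false_iff]
  simp only [pvLt, Bool.or_eq_true, Bool.and_eq_true, Bool.not_eq_eq_eq_not, Bool.not_true,
    decide_eq_true_eq, decide_eq_false_iff_not, not_lt] at h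
  rcases h with h | ⟨h1, h2⟩
  · exact ⟨le_of_lt h, Or.inl h⟩
  · exact ⟨h1, Or.inr (le_of_lt h2)⟩

lemma pvLt_letrans (a b c : String × Int) (hab : pvLt b a = false) (hbc : pvLt c b = false) :
    pvLt c a = false := by
  rw [pvLt_false_iff] at hab hbc ⊢
  obtain ⟨h1, h2⟩ := hab
  obtain ⟨h3, h4⟩ := hbc
  refine ⟨h1.trans h3, ?_⟩
  rcases h2 with h2 | h2
  · exact Or.inl (lt_of_lt_of_le h2 h3)
  · rcases h4 with h4 | h4
    · exact Or.inl (lt_of_le_of_lt h1 h4)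
    · exact Or.inr (h2.trans h4)

lemma pvInsertBy_pairwise {α : Type} (lt : α → α → Bool)
    (hasym : ∀ a b, lt a b = true → lt b a = false)
    (htrans : ∀ a b c, lt b a = false → lt c b = false → lt c a = false)
    (x : α) (ys : List α) (h : ys.Pairwise (fun a b => lt b a = false)) :
    (PySem.List.insertBy lt x ys).Pairwise (fun a b => lt b a = false) := by
  induction ys with
  | nil => simp [PySem.List.insertBy]
  | cons y ys ih =>
    show (if lt x y then x :: y :: ys else y :: PySem.List.insertBy lt x ys).Pairwise _
    rcases List.pairwise_cons.mp h with ⟨hy, hys⟩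
    by_cases hxy : lt x y = true
    · rw [if_pos hxy]
      refine List.pairwise_cons.mpr ⟨?_, h⟩
      intro z hz
      rcases List.mem_cons.mp hz with rfl | hz
      · exact hasym _ _ hxy
      · exact htrans _ _ _ (hasym _ _ hxy) (hy z hz)
    · rw [if_neg hxy]
      refine List.pairwise_cons.mpr ⟨?_, ih hys⟩
      intro z hz
      rcases (PySem.List.mem_insertBy lt x z ys).mp hz with rfl | hz
      · exact Bool.eq_false_iff.mpr hxy
      · exact hy z hz

lemma pvFoldlInsertBy_pairwise {α : Type} (lt : α → α → Bool)
    (hasym : ∀ a b, lt a b = true → lt b a = false)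
    (htrans : ∀ a b c, lt b a = false → lt c b = false → lt c a = false)
    (xs acc : List α) (hacc : acc.Pairwise (fun a b => lt b a = false)) :
    (xs.foldl (fun acc x => PySem.List.insertBy lt x acc) acc).Pairwise
      (fun a b => lt b a = false) := by
  induction xs generalizing acc with
  | nil => exact hacc
  | cons x xs ih => exact ih _ (pvInsertBy_pairwise lt hasym htrans x acc hacc)

-- sorted2 with fst/snd keys IS the insertBy fold with pvLt
lemma pvSorted2_eq (xs : List (String × Int)) :
    PySem.List.sorted2 xs Prod.fst Prod.snd
      = xs.foldl (fun acc x => PySem.List.insertBy pvLt x acc) [] := rfl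

lemma pvSorted2_pairwiseQ (xs : List (String × Int)) :
    (PySem.List.sorted2 xs Prod.fst Prod.snd).Pairwise (fun a b => pvLt b a = false) := by
  rw [pvSorted2_eq]
  exact pvFoldlInsertBy_pairwise pvLt pvLt_asymm pvLt_letrans xs [] (List.Pairwise.nil)

-- on a list whose second components are distinct, the sorted order is pairwise strict-lex
lemma pvSorted2_pairwiseR (xs : List (String × Int))
    (hnd : (xs.map (fun p => p.2)).Nodup) :
    (PySem.List.sorted2 xs Prod.fst Prod.snd).Pairwise
      (fun a b => a.1 ≤ b.1 ∧ (a.1 < b.1 ∨ a.2 < b.2)) := by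
  have hperm := PySem.List.sorted2_perm xs Prod.fst Prod.snd false
  have hnd' : ((PySem.List.sorted2 xs Prod.fst Prod.snd).map (fun p => p.2)).Nodup :=
    ((hperm.map (fun p => p.2)).nodup_iff).mpr hnd
  have hne : (PySem.List.sorted2 xs Prod.fst Prod.snd).Pairwise (fun a b => a.2 ≠ b.2) :=
    (List.pairwise_map).mp hnd'
  have hq := pvSorted2_pairwiseQ xs
  refine (hq.and hne).imp ?_
  rintro a b ⟨hab, hne2⟩
  rw [pvLt_false_iff] at hab
  obtain ⟨h1, h2⟩ := hab
  refine ⟨h1, ?_⟩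
  rcases h2 with h2 | h2
  · exact Or.inl h2
  · exact Or.inr (lt_of_le_of_ne h2 hne2)

-- in the sorted pair list, "previous entry has the same string" is exactly
-- "some entry has the same string and a smaller index"
lemma pvAdj (L : List (String × Int))
    (hR : L.Pairwise (fun a b => a.1 ≤ b.1 ∧ (a.1 < b.1 ∨ a.2 < b.2)))
    (k : Nat) (hk : k < L.length) :
    (decide (0 < (k : Int)) && ((PySem.List.pyGetD L ((k : Int) - 1) ("", 0)).1 == L[k].1))
      = L.any (fun q => q.1 == L[k].1 && decide (q.2 < L[k].2)) := by
  have hG := (List.pairwise_iff_getElem.mp hR)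
  rw [Bool.eq_iff_iff]
  simp only [Bool.and_eq_true, decide_eq_true_eq, beq_iff_eq, List.any_eq_true]
  constructor
  · rintro ⟨hpos, heq⟩
    have hklt : 0 < k := by exact_mod_cast hpos
    have hcast : ((k : Int) - 1) = ((k - 1 : Nat) : Int) := by omega
    rw [hcast, PySem.List.pyGetD_natCast, List.getD_eq_getElem _ _ (by omega : k - 1 < L.length)] at heq
    refine ⟨L[k-1], List.getElem_mem _, heq, ?_⟩
    have hpair := hG (k-1) k (by omega) hk (by omega)
    rcases hpair.2 with h | h
    · rw [heq] at h; exact absurd h (lt_irrefl _)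
    · exact h
  · rintro ⟨q, hq, hq1, hq2⟩
    obtain ⟨k', hk', hqe⟩ := List.mem_iff_getElem.mp hq
    have hkk : k' < k := by
      rcases Nat.lt_trichotomy k' k with h | h | h
      · exact h
      · exfalso; subst h; rw [hqe] at hq2; exact absurd hq2 (lt_irrefl _)
      · exfalso
        have hpair := hG k k' hk hk' h
        rcases hpair.2 with h2 | h2
        · rw [hqe, hq1] at h2; exact absurd h2 (lt_irrefl _)
        · rw [hqe] at h2; exact absurd (h2.trans hq2) (lt_irrefl _)
    have hpos : 0 < (k : Int) := by exact_mod_cast Nat.pos_of_ne_zero (by omega)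
    refine ⟨hpos, ?_⟩
    have hcast : ((k : Int) - 1) = ((k - 1 : Nat) : Int) := by omega
    rw [hcast, PySem.List.pyGetD_natCast, List.getD_eq_getElem _ _ (by omega : k - 1 < L.length)]
    have hle1 : q.1 ≤ L[k-1].1 := by
      rcases Nat.lt_or_ge k' (k-1) with h | h
      · have h1 : L[k'].1 ≤ L[k-1].1 := (hG k' (k-1) hk' (by omega) h).1
        rw [hqe] at h1; exact h1
      · have hke : k' = k - 1 := by omega
        subst hke
        rw [hqe]
    have hle2 : L[k-1].1 ≤ L[k].1 := (hG (k-1) k (by omega) hk (by omega)).1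
    rw [hq1] at hle1
    exact le_antisymm hle2 hle1

-- A's loop body ('append i if c1, else append i if c2') as a filter-then-map
lemma pvFoldlTwoIf {α β : Type} (c1 c2 : α → Bool) (f : α → β) (l : List α) (acc : List β) :
    l.foldl (fun acc x => if c1 x then acc ++ [f x] else if c2 x then acc ++ [f x] else acc) acc
      = acc ++ (l.filter (fun x => c1 x || c2 x)).map f := by
  induction l generalizing acc with
  | nil => simp
  | cons x xs ih =>
    simp only [List.foldl_cons, List.filter_cons]
    cases h1 : c1 x <;> cases h2 : c2 x <;> simp [ih]

-- filtering an enumeration by a property of the element alone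
lemma pvEnumFilterSnd {α : Type} (p : α → Bool) (xs : List α) (s : Int) :
    (((PySem.List.enumerate xs s).filter (fun q => p q.2)).map (fun q => q.2)) = xs.filter p := by
  induction xs generalizing s with
  | nil => simp [PySem.List.enumerate_nil]
  | cons x xs ih =>
    rw [PySem.List.enumerate_cons, List.filter_cons]
    cases hx : p x <;> simp [hx, ih]

def pvFlag (M : List (String × Int)) (p : String × Int) : Bool :=
  p.1 == "" || M.any (fun q => q.1 == p.1 && decide (q.2 < p.2))

-- A's per-element test, rephrased on the (value, index) pair list
lemma pvCondA (mutations : List String) (k : Nat) (hk : k < mutations.length) :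
    ((PySem.Str.len mutations[k] == 0)
      || (PySem.List.pyRange 0 (k : Int)).any
           (fun j => PySem.List.pyGetD mutations j "" == PySem.List.pyGetD mutations (k : Int) ""))
    = pvFlag ((PySem.List.enumerate mutations).map (fun p => (p.2, p.1))) (mutations[k], (k : Int)) := by
  have hlen : (PySem.Str.len mutations[k] == 0) = (mutations[k] == "") := by
    rw [Bool.eq_iff_iff, PySem.Str.len_eq]
    simp only [beq_iff_eq, Nat.cast_eq_zero, List.length_eq_zero_iff]
    exact ⟨fun h => String.toList_inj.mp (by simp [h]), fun h => by simp [h]⟩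
  rw [pvFlag, hlen]
  rcases hs : (mutations[k] == "") with _ | _
  · simp only [Bool.false_or]
    rw [Bool.eq_iff_iff]
    rw [PySem.List.pyRange_zero_natCast, List.any_map, List.any_map]
    simp only [Function.comp, PySem.List.pyGetD_natCast, List.any_eq_true, List.mem_range]
    constructor
    · rintro ⟨j, hj, hb⟩
      rw [List.getD_eq_getElem _ _ (by omega : j < mutations.length),
          List.getD_eq_getElem _ _ hk] at hb
      refine ⟨(↑j, mutations[j]), (PySem.List.mem_enumerate_iff _ _ _).mpr ⟨j, by omega, by simp⟩, ?_⟩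
      simp only [Bool.and_eq_true, beq_iff_eq, decide_eq_true_eq]
      exact ⟨by simpa using hb, by exact_mod_cast hj⟩
    · rintro ⟨q, hq, hb⟩
      obtain ⟨j, hj, rfl⟩ := (PySem.List.mem_enumerate_iff _ _ _).mp hq
      simp only [Bool.and_eq_true, beq_iff_eq, decide_eq_true_eq, zero_add] at hb
      have hjk : j < k := by exact_mod_cast hb.2
      refine ⟨j, hjk, ?_⟩
      rw [List.getD_eq_getElem _ _ (by omega : j < mutations.length), List.getD_eq_getElem _ _ hk]
      simp [hb.1]
  · simp

lemma pvMain (mutations : List String) :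
    find_ambiguous_or_invalid_matches mutations = find_ambiguous_or_invalid_matches_alt mutations := by
  simp only [find_ambiguous_or_invalid_matches, find_ambiguous_or_invalid_matches_alt]
  set pairs0 := (PySem.List.enumerate mutations).map (fun p => (p.2, p.1)) with hpairs0
  set L := PySem.List.sorted2 pairs0 Prod.fst Prod.snd with hL
  have hnd : (pairs0.map (fun p => p.2)).Nodup := by
    rw [hpairs0, List.map_map]
    have : ((fun p : String × Int => p.2) ∘ (fun p : Int × String => (p.2, p.1)))
        = (fun p : Int × String => p.1) := rfl
    rw [this, PySem.List.map_fst_enumerate]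
    simp only [zero_add]
    rw [PySem.List.pyRange_zero_natCast]
    exact List.Nodup.map (fun a b => by exact_mod_cast id) (List.nodup_range)
  have hR := pvSorted2_pairwiseR pairs0 hnd
  have hperm : L.Perm pairs0 := PySem.List.sorted2_perm pairs0 Prod.fst Prod.snd false
  -- B side: replace the positional test by the element-only flag
  have hB : ((PySem.List.enumerate L).filter
        (fun q => q.2.1 == "" ||
          (decide (0 < q.1) && (PySem.List.pyGetD L (q.1 - 1) ("", 0)).1 == q.2.1)))
      = (PySem.List.enumerate L).filter (fun q => pvFlag L q.2) := by
    refine List.filter_congr ?_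
    intro q hq
    obtain ⟨k, hk, rfl⟩ := (PySem.List.mem_enumerate_iff _ _ _).mp hq
    simp only [zero_add]
    rw [pvFlag]
    exact congrArg (L[k].1 == "" || ·) (pvAdj L hR k hk)
  have hmm : List.map (fun q : Int × (String × Int) => q.2.2)
        ((PySem.List.enumerate L).filter (fun q => pvFlag L q.2))
      = List.map (fun r : String × Int => r.2)
          (List.map (fun q : Int × (String × Int) => q.2)
            ((PySem.List.enumerate L).filter (fun q => pvFlag L q.2))) := by
    rw [List.map_map]; rfl
  rw [hB, hmm, pvEnumFilterSnd]
  -- the flag may test membership in pairs0 instead of L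
  have hFlag : L.filter (pvFlag L) = L.filter (pvFlag pairs0) := by
    refine List.filter_congr ?_
    intro q _
    rw [pvFlag, pvFlag, hperm.any_eq]
  rw [hFlag]
  -- A side
  rw [pvFoldlTwoIf (fun p : Int × String => PySem.Str.len p.2 == 0)
        (fun p : Int × String => (PySem.List.pyRange 0 p.1).any
          (fun j => PySem.List.pyGetD mutations j "" == PySem.List.pyGetD mutations p.1 ""))
        (fun p => p.1), List.nil_append]
  have hA : (PySem.List.enumerate mutations).filter
        (fun p => (PySem.Str.len p.2 == 0) ||
          (PySem.List.pyRange 0 p.1).any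
            (fun j => PySem.List.pyGetD mutations j "" == PySem.List.pyGetD mutations p.1 ""))
      = (PySem.List.enumerate mutations).filter (fun p => pvFlag pairs0 (p.2, p.1)) := by
    refine List.filter_congr ?_
    intro p hp
    obtain ⟨k, hk, rfl⟩ := (PySem.List.mem_enumerate_iff _ _ _).mp hp
    simp only [zero_add]
    exact pvCondA mutations k hk
  rw [hA]
  -- both sides are now lists of the flagged indices; B's is A's re-sorted
  have hAeq : ((pairs0.filter (pvFlag pairs0)).map (fun p => p.2))
      = ((PySem.List.enumerate mutations).filter (fun p => pvFlag pairs0 (p.2, p.1))).map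
          (fun p => p.1) := by
    rw [hpairs0, List.filter_map, List.map_map]
    rfl
  have hpw : (((PySem.List.enumerate mutations).filter
        (fun p => pvFlag pairs0 (p.2, p.1))).map (fun p => p.1)).Pairwise (· < ·) := by
    refine List.pairwise_map.mpr ?_
    exact (PySem.List.pairwise_lt_enumerate mutations 0).filter _
  have hout : (((PySem.List.enumerate mutations).filter
        (fun p => pvFlag pairs0 (p.2, p.1))).map (fun p => p.1)).Perm
      ((L.filter (pvFlag pairs0)).map (fun q => q.2)) := by
    rw [← hAeq]
    exact ((hperm.filter _).map _).symm
  exact (PySem.List.sorted_eq_of_perm_of_pairwise_lt _ _ _ hout hpw).symm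

-- ===== VERDICT (by name: the statement is the Claim_ definition above) =====
theorem find_ambiguous_or_invalid_matches_spec : Claim_equal_find_ambiguous_or_invalid_matches := by
  intro mutations _
  show find_ambiguous_or_invalid_matches mutations = find_ambiguous_or_invalid_matches_alt mutations
  exact pvMain mutations
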